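-- pv_equiv track=rewrite | github.com/evan-freeman/advent-of-code | 2021/day6/day6.py | simulate_one_fish
-- ===== SOURCE A (Python) =====
-- def multiples_less_than_or_equal(divisor, upper_limit):
--     return [x for x in range(upper_limit + 1) if x % divisor == 0]
--
-- def simulate_one_fish(fish, num_days):
--     value = fish["value"]
--     starting_day = fish["starting_day"]
--     displacement = value + starting_day + 1
--     upper_limit = num_days - displacement
--     multiples = multiples_less_than_or_equal(7, upper_limit=upper_limit)
--     breeding_days = [day + displacement for day in multiples]
--     return breeding_days
-- ===== SOURCE B (Python) =====
-- def simulate_one_fish(fish, num_days):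
--     displacement = fish["value"] + fish["starting_day"] + 1
--     return list(range(displacement, num_days + 1, 7))
-- ===== Notes on version B (the rewrite author's own statement) =====
-- stated objective: simpler
-- what changed: Replaces A's two-pass pipeline (filter all integers 0..upper_limit for multiples of 7, then shift each by displacement) with a single strided range starting at displacement with step 7.
import Mathlib
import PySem

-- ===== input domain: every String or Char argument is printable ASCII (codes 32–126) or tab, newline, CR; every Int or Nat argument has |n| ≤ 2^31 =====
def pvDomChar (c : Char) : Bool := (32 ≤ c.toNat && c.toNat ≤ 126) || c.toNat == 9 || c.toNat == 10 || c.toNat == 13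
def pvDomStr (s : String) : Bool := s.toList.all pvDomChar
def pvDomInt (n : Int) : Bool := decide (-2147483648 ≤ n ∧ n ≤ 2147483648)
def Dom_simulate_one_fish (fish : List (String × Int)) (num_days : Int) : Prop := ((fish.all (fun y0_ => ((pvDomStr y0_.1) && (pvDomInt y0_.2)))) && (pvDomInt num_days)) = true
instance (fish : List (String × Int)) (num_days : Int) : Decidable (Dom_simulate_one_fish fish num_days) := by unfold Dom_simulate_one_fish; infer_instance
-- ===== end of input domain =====

-- B replaces A's two passes (filter 0..upper_limit for multiples of 7, then shift) with one
-- direct strided range; objective: simpler.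

-- ===== PORT A =====
def simulate_one_fish (fish : List (String × Int)) (num_days : Int) : List Int :=
  match fish.lookup "value", fish.lookup "starting_day" with
  | some value, some starting_day =>
    let displacement := value + starting_day + 1
    let upper_limit := num_days - displacement
    -- multiples_less_than_or_equal(7, upper_limit)
    let multiples := (PySem.List.pyRange 0 (upper_limit + 1) 1).filter
      (fun x => PySem.Int.mod x 7 == 0)
    multiples.map (fun day => day + displacement)
  | _, _ => []  -- KeyError in Python: excluded by Pre_

-- ===== PORT B =====
def simulate_one_fish_alt (fish : List (String × Int)) (num_days : Int) : List Int :=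
  match fish.lookup "value" with
  | none => []  -- KeyError in Python: excluded by Pre_
  | some value =>
    match fish.lookup "starting_day" with
    | none => []  -- KeyError in Python: excluded by Pre_
    | some starting_day =>
      PySem.List.pyRange (value + starting_day + 1) (num_days + 1) 7

-- ===== PRECONDITION & SPEC =====
-- Pre_ excludes only dicts missing the "value" or "starting_day" key, on which A raises KeyError.
def Pre_simulate_one_fish (fish : List (String × Int)) (num_days : Int) : Prop :=
  (fish.lookup "value").isSome = true ∧ (fish.lookup "starting_day").isSome = true
instance (fish : List (String × Int)) (num_days : Int) : Decidable (Pre_simulate_one_fish fish num_days) := by unfold Pre_simulate_one_fish; infer_instance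
def pvWitness_simulate_one_fish : (List (String × Int)) × Int := ([("value", 2), ("starting_day", 3)], 20)

def Spec_simulate_one_fish (fish : List (String × Int)) (num_days : Int) (out : List Int) : Prop := out = simulate_one_fish_alt fish num_days
instance (fish : List (String × Int)) (num_days : Int) (out : List Int) : Decidable (Spec_simulate_one_fish fish num_days out) := by unfold Spec_simulate_one_fish; infer_instance

-- ===== CLAIM (what is proved, stated in full; the proofs are below) =====
def Claim_equal_simulate_one_fish : Prop := ∀ (fish : List (String × Int)) (num_days : Int), Dom_simulate_one_fish fish num_days → Pre_simulate_one_fish fish num_days → Spec_simulate_one_fish fish num_days (simulate_one_fish fish num_days)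

-- ===== LEMMAS AND PROOFS =====

-- multiples of 7 among 0..N-1, as a strided map
theorem filter_range_mod7 (N : Nat) :
    (List.range N).filter (fun k => k % 7 == 0)
      = (List.range ((N + 6) / 7)).map (· * 7) := by
  induction N with
  | zero => simp
  | succ n ih =>
    rw [List.range_succ, List.filter_append, ih]
    by_cases h : n % 7 = 0
    · have h1 : (n + 1 + 6) / 7 = (n + 6) / 7 + 1 := by omega
      have h2 : (n + 6) / 7 * 7 = n := by omega
      simp [h, h1, List.range_succ, h2]
    · have h1 : (n + 1 + 6) / 7 = (n + 6) / 7 := by omega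
      simp [h, h1]

-- the core identity: A's shifted multiples are B's strided range
theorem core (d nd : Int) :
    ((PySem.List.pyRange 0 (nd - d + 1) 1).filter (fun x => PySem.Int.mod x 7 == 0)).map
        (fun day => day + d)
      = PySem.List.pyRange d (nd + 1) 7 := by
  rw [PySem.List.pyRange_one, PySem.List.pyRange_of_pos d (nd + 1) (by norm_num)]
  rw [List.filter_map]
  have hp : ((fun x => PySem.Int.mod x 7 == 0) ∘ fun k : Nat => (0 : Int) + ↑k)
      = (fun k : Nat => k % 7 == 0) := by
    funext k
    simp [Function.comp, PySem.Int.mod_eq_zero_iff_dvd]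
    omega
  rw [hp, filter_range_mod7]
  have hn : ((nd - d + 1 - 0).toNat + 6) / 7
      = (if d < nd + 1 then ((nd + 1 - d + 7 - 1) / 7).toNat else 0) := by
    split_ifs with h <;> omega
  rw [← hn, List.map_map, List.map_map]
  apply List.map_congr_left
  intro k _
  simp only [Function.comp]
  push_cast
  ring

-- ===== VERDICT (by name: the statement is the Claim_ definition above) =====
theorem simulate_one_fish_spec : Claim_equal_simulate_one_fish := by
  intro fish num_days _ hpre
  obtain ⟨h1, h2⟩ := hpre
  unfold Spec_simulate_one_fish simulate_one_fish simulate_one_fish_alt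
  obtain ⟨v, hv⟩ := Option.isSome_iff_exists.mp h1
  obtain ⟨s, hs⟩ := Option.isSome_iff_exists.mp h2
  rw [hv, hs]
  simp only
  have := core (v + s + 1) num_days
  simpa using this
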